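-- pv_equiv track=rewrite | github.com/dragonfly1033/NEA | parsing/parse.py | unitize
-- ===== SOURCE A (Python) =====
-- def unitize(expr):
--     def removeExtraBrackets(s):
--         pairs = []
--         openB = []
--         new = ''
--         toRemove = []
--         for i, v in enumerate(s):
--             if v == '(':
--                 openB.append(i)
--             if v == ')':
--                 pairs.append([openB.pop(), i])
--
--         for p in pairs:
--             if p[0] == 0 and p[1] == len(s)-1:
--                 toRemove.append(p[0])
--                 toRemove.append(p[1])
--                 continue
--
--             between = s[p[0]+1:p[1]]
--             if '+' in between or '*' in between or '¬' in between:
--                 continue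
--             toRemove.append(p[0])
--             toRemove.append(p[1])
--
--         for i, v in enumerate(s):
--             if i not in toRemove:
--                 new += v
--
--         return new
--
--     new = removeExtraBrackets(expr)
--     while expr != new:
--         expr = new
--         new = removeExtraBrackets(expr)
--
--     return new
-- ===== SOURCE B (Python) =====
-- def unitize(expr):
--     OPS = '+*\u00ac'
--
--     def strip(s):
--         n = len(s)
--         stack = []      # (index of '(', operator count before it)
--         remove = set()
--         k = 0           # operators seen so far
--         for i, c in enumerate(s):
--             if c == '(':
--                 stack.append((i, k))
--             elif c == ')':
--                 j, kj = stack.pop()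
--                 if (j == 0 and i == n - 1) or k == kj:
--                     remove.add(j)
--                     remove.add(i)
--             elif c in OPS:
--                 k += 1
--         return ''.join(c for i, c in enumerate(s) if i not in remove)
--
--     new = strip(expr)
--     while expr != new:
--         expr = new
--         new = strip(expr)
--     return new
-- ===== Notes on version B (the rewrite author's own statement) =====
-- stated objective: alternative
-- what changed: Each pass now pairs brackets and decides removability in one stack scan, storing the running operator count with each '(' so the 'operator between the pair?' test is a count comparison instead of a substring scan per pair, with a set instead of a list for removal membership.
import Mathlib
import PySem

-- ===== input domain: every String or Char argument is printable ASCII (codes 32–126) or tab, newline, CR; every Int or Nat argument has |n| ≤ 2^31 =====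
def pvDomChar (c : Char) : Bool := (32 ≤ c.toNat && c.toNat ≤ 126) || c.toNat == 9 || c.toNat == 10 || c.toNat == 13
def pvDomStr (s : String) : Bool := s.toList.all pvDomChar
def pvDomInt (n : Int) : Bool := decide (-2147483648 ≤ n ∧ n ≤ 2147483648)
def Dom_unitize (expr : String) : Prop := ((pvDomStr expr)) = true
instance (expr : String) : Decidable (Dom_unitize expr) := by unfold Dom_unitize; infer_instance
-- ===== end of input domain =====

-- B restructures each stripping round: one stack scan that carries running operator
-- counts decides every pair's removability, with a set for removal membership.

-- ===== PORT A =====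
-- first loop of removeExtraBrackets: build (pairs, openB); Python's list-as-stack
-- (append/pop at the end) is modelled head-first; pop from empty (Python
-- IndexError, excluded by Pre_) is a no-op here. enumerate is a Nat counter.
def pvPairsLoopA : List Char → Nat → List (Nat × Nat) → List Nat → (List (Nat × Nat) × List Nat)
  | [], _, pairs, openB => (pairs, openB)
  | v :: rest, i, pairs, openB =>
    let openB' := if v = '(' then i :: openB else openB
    if v = ')' then
      match openB' with
      | o :: tl => pvPairsLoopA rest (i+1) (pairs ++ [(o, i)]) tl
      | [] => pvPairsLoopA rest (i+1) pairs openB'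
    else pvPairsLoopA rest (i+1) pairs openB'

-- second loop: build toRemove; between = s[p0+1:p1] is exact as drop/take (0 ≤ p0+1)
def pvCollectLoopA (s : List Char) : List (Nat × Nat) → List Nat → List Nat
  | [], tr => tr
  | p :: ps, tr =>
    if p.1 = 0 ∧ p.2 = s.length - 1 then pvCollectLoopA s ps (tr ++ [p.1, p.2])
    else
      let between := (s.drop (p.1+1)).take (p.2 - (p.1+1))
      if between.contains '+' || between.contains '*' || between.contains '¬' then
        pvCollectLoopA s ps tr
      else pvCollectLoopA s ps (tr ++ [p.1, p.2])

-- third loop: new += v for indices not in toRemove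
def pvBuildLoopA : List Char → Nat → List Nat → List Char → List Char
  | [], _, _, new => new
  | v :: rest, i, tr, new =>
    pvBuildLoopA rest (i+1) tr (if tr.contains i then new else new ++ [v])

def pvRemoveA (s : List Char) : List Char :=
  pvBuildLoopA s 0 (pvCollectLoopA s (pvPairsLoopA s 0 [] []).1 []) []

-- the while loop; fuel |expr|+1 only makes it total (each changing round shrinks s)
def pvLoopA : Nat → List Char → List Char
  | 0, e => e
  | f+1, e => let n := pvRemoveA e; if n = e then n else pvLoopA f n

def unitize (expr : String) : String := String.ofList (pvLoopA (expr.toList.length + 1) expr.toList)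

-- ===== PORT B =====
def pvIsOp (c : Char) : Bool := c == '+' || c == '*' || c == '¬'

-- single pass of strip: stack of (index, op count before it), removal Set, running count k
def pvStripLoopB (n : Nat) : List Char → Nat → List (Nat × Nat) → PySem.Set Nat → Nat → PySem.Set Nat
  | [], _, _, remove, _ => remove
  | c :: rest, i, stack, remove, k =>
    if c = '(' then pvStripLoopB n rest (i+1) ((i, k) :: stack) remove k
    else if c = ')' then
      match stack with
      | (j, kj) :: tl =>
        if (j = 0 ∧ i = n - 1) ∨ k = kj then
          pvStripLoopB n rest (i+1) tl ((PySem.Set.add remove j).add i) k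
        else pvStripLoopB n rest (i+1) tl remove k
      | [] => pvStripLoopB n rest (i+1) [] remove k  -- Python IndexError; outside Pre_
    else if pvIsOp c then pvStripLoopB n rest (i+1) stack remove (k+1)
    else pvStripLoopB n rest (i+1) stack remove k

-- ''.join(c for i, c in enumerate(s) if i not in remove)
def pvJoinLoopB : List Char → Nat → PySem.Set Nat → List Char → List Char
  | [], _, _, acc => acc
  | c :: rest, i, rm, acc =>
    pvJoinLoopB rest (i+1) rm (if PySem.Set.contains rm i then acc else acc ++ [c])

def pvStripB (s : List Char) : List Char :=
  pvJoinLoopB s 0 (pvStripLoopB s.length s 0 [] PySem.Set.empty 0) []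

def pvLoopB : Nat → List Char → List Char
  | 0, e => e
  | f+1, e => let n := pvStripB e; if n = e then n else pvLoopB f n

def unitize_alt (expr : String) : String := String.ofList (pvLoopB (expr.toList.length + 1) expr.toList)

-- ===== PRECONDITION & SPEC =====
-- Both programs pop a stack at each ')': an unmatched ')' (some prefix with more
-- ')' than '(') raises IndexError in A (and in B); exactly those inputs are excluded.
def Pre_unitize (expr : String) : Prop :=
  ∀ t ∈ expr.toList.inits, t.count ')' ≤ t.count '('
instance (expr : String) : Decidable (Pre_unitize expr) := by unfold Pre_unitize; infer_instance

def pvWitness_unitize : String := "((a+b))"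

def Spec_unitize (expr : String) (out : String) : Prop := out = unitize_alt expr
instance (expr : String) (out : String) : Decidable (Spec_unitize expr out) := by unfold Spec_unitize; infer_instance

-- ===== CLAIM (what is proved, stated in full; the proofs are below) =====
def Claim_equal_unitize : Prop := ∀ (expr : String), Dom_unitize expr → Pre_unitize expr → Spec_unitize expr (unitize expr)

-- ===== LEMMAS AND PROOFS =====

def pvCountOp (l : List Char) : Nat := l.countP (fun c => pvIsOp c)

-- decision fold that pvStripLoopB implements over the pairs A computes
def pvDecide (s : List Char) (rm : PySem.Set Nat) (p : Nat × Nat) : PySem.Set Nat :=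
  if (p.1 = 0 ∧ p.2 = s.length - 1) ∨ pvCountOp (s.take p.2) = pvCountOp (s.take p.1)
  then (PySem.Set.add rm p.1).add p.2 else rm

-- basic facts about s.drop i = v :: rest
theorem pvDropCons {s rest : List Char} {v : Char} {i : Nat} (h : s.drop i = v :: rest) :
    i < s.length ∧ s[i]? = some v ∧ s.drop (i+1) = rest := by
  have hlt : i < s.length := by
    by_contra hc
    rw [List.drop_eq_nil_iff.2 (by omega)] at h
    simp at h
  refine ⟨hlt, ?_, ?_⟩
  · have : (s.drop i)[0]? = s[i + 0]? := List.getElem?_drop ..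
    simpa [h] using this.symm
  · have : (s.drop i).drop 1 = s.drop (i + 1) := List.drop_drop ..
    simpa [h] using this.symm

theorem pvCountOp_take_succ {s : List Char} {v : Char} {i : Nat} (h : s[i]? = some v) :
    pvCountOp (s.take (i+1)) = pvCountOp (s.take i) + (if pvIsOp v then 1 else 0) := by
  rw [List.take_succ, h]
  simp [pvCountOp, List.countP_append, List.countP_cons]

-- pairs accumulator lemma
theorem pvPairsLoopA_acc (rest : List Char) :
    ∀ (i : Nat) (pairs : List (Nat × Nat)) (openB : List Nat),
    (pvPairsLoopA rest i pairs openB).1 = pairs ++ (pvPairsLoopA rest i [] openB).1 := by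
  induction rest with
  | nil => intro i pairs openB; simp [pvPairsLoopA]
  | cons v rest ih =>
    intro i pairs openB
    by_cases hv : v = '('
    · subst hv
      simp only [pvPairsLoopA, Char.reduceEq, reduceIte]
      exact ih ..
    · by_cases hv2 : v = ')'
      · subst hv2
        cases openB with
        | nil => simp only [pvPairsLoopA, Char.reduceEq, reduceIte]; exact ih ..
        | cons o tl =>
          simp only [pvPairsLoopA, Char.reduceEq, reduceIte]
          rw [ih (i+1) (pairs ++ [(o, i)]) tl, ih (i+1) ([] ++ [(o, i)]) tl]
          simp
      · simp only [pvPairsLoopA, if_neg hv, if_neg hv2]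
        exact ih ..

theorem pvGetBang {s : List Char} {v : Char} {i : Nat} (h : s[i]? = some v) : s[i]! = v := by
  have hlt : i < s.length := by
    by_contra hc
    rw [List.getElem?_eq_none (by omega)] at h
    simp at h
  have := List.getElem?_eq_getElem (l := s) (i := i) hlt
  rw [this] at h
  simp [List.getElem!_eq_getElem?_getD, List.getElem?_eq_getElem hlt, Option.some.inj h]

-- well-formedness of produced pairs
theorem pvPairsLoopA_wf (s : List Char) (rest : List Char) :
    ∀ (i : Nat) (pairs : List (Nat × Nat)) (openB : List Nat),
    rest = s.drop i →
    (∀ p ∈ pairs, p.1 < s.length ∧ s[p.1]! =  '(' ∧ p.1 < p.2 ∧ p.2 < s.length) →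
    (∀ j ∈ openB, j < i ∧ j < s.length ∧ s[j]! =  '(') →
    ∀ p ∈ (pvPairsLoopA rest i pairs openB).1,
      p.1 < s.length ∧ s[p.1]! =  '(' ∧ p.1 < p.2 ∧ p.2 < s.length := by
  induction rest with
  | nil => intro i pairs openB _ hpairs _; simpa [pvPairsLoopA] using hpairs
  | cons v rest ih =>
    intro i pairs openB hrest hpairs hopen
    obtain ⟨hlt, hget, hdrop⟩ := pvDropCons hrest.symm
    by_cases hv : v = '('
    · subst hv
      simp only [pvPairsLoopA, Char.reduceEq, reduceIte]
      refine ih (i+1) pairs (i :: openB) hdrop.symm hpairs ?_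
      intro j hj
      rcases List.mem_cons.1 hj with h | h
      · subst h; exact ⟨by omega, hlt, pvGetBang hget⟩
      · obtain ⟨h1, h2⟩ := hopen j h; exact ⟨by omega, h2⟩
    · by_cases hv2 : v = ')'
      · subst hv2
        cases openB with
        | nil =>
          simp only [pvPairsLoopA, Char.reduceEq, reduceIte]
          exact ih (i+1) pairs [] hdrop.symm hpairs (by simp)
        | cons o tl =>
          simp only [pvPairsLoopA, Char.reduceEq, reduceIte]
          refine ih (i+1) (pairs ++ [(o, i)]) tl hdrop.symm ?_ ?_
          · intro p hp
            rcases List.mem_append.1 hp with h | h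
            · exact hpairs p h
            · obtain ⟨h1, h2, h3⟩ := hopen o (by simp)
              simp only [List.mem_singleton] at h
              subst h
              exact ⟨h2, h3, h1, hlt⟩
          · intro j hj
            obtain ⟨h1, h2⟩ := hopen j (by simp [hj])
            exact ⟨by omega, h2⟩
      · simp only [pvPairsLoopA, if_neg hv, if_neg hv2]
        refine ih (i+1) pairs openB hdrop.symm hpairs ?_
        intro j hj
        obtain ⟨h1, h2⟩ := hopen j hj
        exact ⟨by omega, h2⟩

-- B's stack pass computes the decision fold over A's pairs
theorem pvStrip_eq_fold (s : List Char) (rest : List Char) :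
    ∀ (i : Nat) (openB : List Nat) (rm : PySem.Set Nat) (k : Nat),
    rest = s.drop i →
    (∀ j ∈ openB, j < i ∧ j < s.length ∧ s[j]! =  '(') →
    k = pvCountOp (s.take i) →
    pvStripLoopB s.length rest i (openB.map (fun j => (j, pvCountOp (s.take j)))) rm k
      = ((pvPairsLoopA rest i [] openB).1).foldl (pvDecide s) rm := by
  induction rest with
  | nil => intro i openB rm k _ _ _; simp [pvStripLoopB, pvPairsLoopA]
  | cons v rest ih =>
    intro i openB rm k hrest hopen hk
    obtain ⟨hlt, hget, hdrop⟩ := pvDropCons hrest.symm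
    have hksucc := pvCountOp_take_succ hget
    by_cases hv : v = '('
    · subst hv
      simp only [pvStripLoopB, pvPairsLoopA, Char.reduceEq, reduceIte]
      have hstack : ((i, k) :: openB.map (fun j => (j, pvCountOp (s.take j))))
          = (i :: openB).map (fun j => (j, pvCountOp (s.take j))) := by simp [hk]
      rw [hstack]
      refine ih (i+1) (i :: openB) rm k hdrop.symm ?_ ?_
      · intro j hj
        rcases List.mem_cons.1 hj with h | h
        · subst h; exact ⟨by omega, hlt, pvGetBang hget⟩
        · obtain ⟨h1, h2⟩ := hopen j h; exact ⟨by omega, h2⟩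
      · rw [hksucc]; simpa [pvIsOp] using hk
    · by_cases hv2 : v = ')'
      · subst hv2
        cases openB with
        | nil =>
          simp only [pvStripLoopB, pvPairsLoopA, Char.reduceEq, reduceIte, List.map_nil]
          refine ih (i+1) [] rm k hdrop.symm (by simp) ?_
          rw [hksucc]; simpa [pvIsOp] using hk
        | cons o tl =>
          subst hk
          simp only [pvStripLoopB, pvPairsLoopA, Char.reduceEq, reduceIte, List.map_cons]
          rw [pvPairsLoopA_acc rest (i+1) ([] ++ [(o, i)]) tl, List.nil_append,
            List.foldl_append, List.foldl_cons, List.foldl_nil]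
          have hih := fun rm' => ih (i+1) tl rm' _ hdrop.symm
            (fun j hj => ⟨by have := (hopen j (by simp [hj])).1; omega,
              (hopen j (by simp [hj])).2⟩)
            (by rw [hksucc])
          simp only [pvDecide]
          split_ifs with hcond <;> exact hih _
      · by_cases hop : pvIsOp v
        · simp only [pvStripLoopB, pvPairsLoopA, if_neg hv, if_neg hv2, hop, if_pos trivial]
          refine ih (i+1) openB rm (k+1) hdrop.symm ?_ ?_
          · intro j hj
            obtain ⟨h1, h2⟩ := hopen j hj
            exact ⟨by omega, h2⟩
          · rw [hksucc]; simp [hop]; omega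
        · simp only [pvStripLoopB, pvPairsLoopA, if_neg hv, if_neg hv2]
          rw [if_neg (by simpa using hop)]
          refine ih (i+1) openB rm k hdrop.symm ?_ ?_
          · intro j hj
            obtain ⟨h1, h2⟩ := hopen j hj
            exact ⟨by omega, h2⟩
          · rw [hksucc]; simpa [hop] using hk

theorem pvSetContainsAdd (s : PySem.Set Nat) (y x : Nat) :
    PySem.Set.contains (PySem.Set.add s y) x = (PySem.Set.contains s x || x == y) := by
  simp [PySem.Set.contains, PySem.Set.mem_add]
  by_cases h : x = y <;> simp [h]

theorem pvContainsAppendPair (l : List Nat) (a b x : Nat) :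
    (l ++ [a, b]).contains x = ((l.contains x || x == a) || x == b) := by
  by_cases h1 : x = a <;> by_cases h2 : x = b <;> by_cases hm : x ∈ l <;>
    simp [h1, h2, hm]

-- A's substring-scan test agrees with the prefix-count test on a well-formed pair
theorem pvBetween_ops {s : List Char} {o i : Nat} (hget : s[o]? = some '(') (hoi : o < i) :
    ((((s.drop (o+1)).take (i - (o+1))).contains '+'
      || ((s.drop (o+1)).take (i - (o+1))).contains '*')
      || ((s.drop (o+1)).take (i - (o+1))).contains '¬') = false
    ↔ pvCountOp (s.take i) = pvCountOp (s.take o) := by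
  have htake : s.take i = s.take (o+1) ++ (s.drop (o+1)).take (i - (o+1)) := by
    conv_lhs => rw [show i = (o+1) + (i - (o+1)) by omega, List.take_add]
  have h1 : pvCountOp (s.take (o+1)) = pvCountOp (s.take o) := by
    rw [List.take_add_one, hget]
    simp [pvCountOp, List.countP_append, pvIsOp]
  have h2 : pvCountOp (s.take i)
      = pvCountOp (s.take o) + pvCountOp ((s.drop (o+1)).take (i - (o+1))) := by
    rw [htake, pvCountOp, List.countP_append, ← pvCountOp, ← pvCountOp, h1]
  rw [h2]
  have h3 : (pvCountOp (s.take o) + pvCountOp ((s.drop (o+1)).take (i - (o+1)))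
      = pvCountOp (s.take o)) ↔ pvCountOp ((s.drop (o+1)).take (i - (o+1))) = 0 := by omega
  rw [h3, pvCountOp, List.countP_eq_zero]
  simp [pvIsOp]
  constructor
  · intro h a ha
    exact ⟨⟨fun e => h.1.1 (e ▸ ha), fun e => h.1.2 (e ▸ ha)⟩, fun e => h.2 (e ▸ ha)⟩
  · intro h
    exact ⟨⟨fun hc => (h _ hc).1.1 rfl, fun hc => (h _ hc).1.2 rfl⟩, fun hc => (h _ hc).2 rfl⟩

-- A's decision on a well-formed pair agrees with the count test
theorem pvCollect_contains (s : List Char) (pairs : List (Nat × Nat)) :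
    ∀ (tr : List Nat) (rm : PySem.Set Nat),
    (∀ p ∈ pairs, p.1 < s.length ∧ s[p.1]! =  '(' ∧ p.1 < p.2 ∧ p.2 < s.length) →
    (∀ x : Nat, tr.contains x = PySem.Set.contains rm x) →
    ∀ x : Nat, (pvCollectLoopA s pairs tr).contains x
      = PySem.Set.contains (pairs.foldl (pvDecide s) rm) x := by
  induction pairs with
  | nil => intro tr rm _ h x; simpa [pvCollectLoopA] using h x
  | cons p ps ih =>
    intro tr rm hwf h x
    obtain ⟨hplt, hpget, hpoi, hpn⟩ := hwf p (by simp)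
    have hget : s[p.1]? = some '(' := by
      have he : s[p.1]? = some s[p.1] := List.getElem?_eq_getElem hplt
      rw [List.getElem!_eq_getElem?_getD, he] at hpget
      simp at hpget
      rw [he, hpget]
    have hwf' : ∀ q ∈ ps, q.1 < s.length ∧ s[q.1]! = '(' ∧ q.1 < q.2 ∧ q.2 < s.length :=
      fun q hq => hwf q (by simp [hq])
    have hadd : ∀ x : Nat, (tr ++ [p.1, p.2]).contains x
        = PySem.Set.contains ((PySem.Set.add rm p.1).add p.2) x := by
      intro x
      rw [pvContainsAppendPair, pvSetContainsAdd, pvSetContainsAdd, h x]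
    by_cases hc1 : p.1 = 0 ∧ p.2 = s.length - 1
    · rw [pvCollectLoopA, if_pos hc1, List.foldl_cons,
        show pvDecide s rm p = (PySem.Set.add rm p.1).add p.2 from by
          simp only [pvDecide]; rw [if_pos (Or.inl hc1)]]
      exact ih _ _ hwf' hadd x
    · rw [pvCollectLoopA, if_neg hc1, List.foldl_cons]
      by_cases hb : (((s.drop (p.1+1)).take (p.2 - (p.1+1))).contains '+'
          || ((s.drop (p.1+1)).take (p.2 - (p.1+1))).contains '*')
          || ((s.drop (p.1+1)).take (p.2 - (p.1+1))).contains '¬'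
      · rw [if_pos hb,
          show pvDecide s rm p = rm from by
            simp only [pvDecide]
            rw [if_neg]
            rintro (h1 | h2)
            · exact hc1 h1
            · rw [← (pvBetween_ops hget hpoi)] at h2
              rw [hb] at h2
              simp at h2]
        exact ih _ _ hwf' h x
      · have hb' := Bool.eq_false_iff.2 hb
        rw [if_neg hb,
          show pvDecide s rm p = (PySem.Set.add rm p.1).add p.2 from by
            simp only [pvDecide]
            rw [if_pos (Or.inr ((pvBetween_ops hget hpoi).1 hb'))]]
        exact ih _ _ hwf' hadd x

theorem pvBuild_eq_join (tr : List Nat) (rm : PySem.Set Nat)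
    (h : ∀ x : Nat, tr.contains x = PySem.Set.contains rm x) :
    ∀ (rest : List Char) (i : Nat) (acc : List Char),
    pvBuildLoopA rest i tr acc = pvJoinLoopB rest i rm acc := by
  intro rest
  induction rest with
  | nil => intro i acc; rfl
  | cons c rest ih =>
    intro i acc
    simp only [pvBuildLoopA, pvJoinLoopB, h i]
    exact ih ..

theorem pvRemove_eq (s : List Char) : pvRemoveA s = pvStripB s := by
  have hwf := pvPairsLoopA_wf s s 0 [] [] (by simp) (by simp) (by simp)
  have hstrip := pvStrip_eq_fold s s 0 [] PySem.Set.empty 0 (by simp) (by simp)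
    (by simp [pvCountOp])
  simp only [List.map_nil] at hstrip
  have hcont := pvCollect_contains s (pvPairsLoopA s 0 [] []).1 [] PySem.Set.empty hwf
    (fun x => by simp [PySem.Set.contains, PySem.Set.empty])
  exact pvBuild_eq_join _ _ (fun x => by rw [hcont x, ← hstrip]) s 0 []

theorem pvLoop_eq (f : Nat) (e : List Char) : pvLoopA f e = pvLoopB f e := by
  induction f generalizing e with
  | zero => rfl
  | succ f ih =>
    simp only [pvLoopA, pvLoopB, pvRemove_eq]
    split <;> [rfl; exact ih _]

-- ===== VERDICT (by name: the statement is the Claim_ definition above) =====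
theorem unitize_spec : Claim_equal_unitize := by
  intro expr _ _
  unfold Spec_unitize unitize unitize_alt
  rw [pvLoop_eq]
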